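-- pv_equiv track=rewrite | github.com/Luis-Fernando-Barbosa-Lozano/AlgoritmosClasificacion | discriminanteLineal.py | matriz_dispersion
-- ===== SOURCE A (Python) =====
-- def matriz_dispersion(datos, media):
--     d = len(media)
--     S = [[0] * d for _ in range(d)]
--
--     for registro in datos:
--         diferencia = [registro[i] - media[i] for i in range(d)]
--         for i in range(d):
--             for j in range(d):
--                 S[i][j] += diferencia[i] * diferencia[j]
--
--     return S
-- ===== SOURCE B (Python) =====
-- def matriz_dispersion(datos, media):
--     d = len(media)
--     # Phase 1: centered matrix X
--     X = [[registro[i] - media[i] for i in range(d)] for registro in datos]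
--     # Phase 2: S = X^T . X, entry by entry; rows below the diagonal reuse
--     # already-computed entries by symmetry (S[i][j] = S[j][i]).
--     S = []
--     for i in range(d):
--         fila = []
--         for j in range(d):
--             if j < i:
--                 fila.append(S[j][i])
--             else:
--                 fila.append(sum(x[i] * x[j] for x in X))
--             # record order inside the sum matches A's accumulation order
--         S.append(fila)
--     return S
-- ===== Notes on version B (the rewrite author's own statement) =====
-- stated objective: alternative
-- what changed: Replaced the per-record outer-product accumulation into a mutable d x d matrix by a two-phase computation: first materialize the centered matrix X, then build S row by row as X^T.X with each entry an independent inner-product sum, copying below-diagonal entries from already-built rows by symmetry.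
import Mathlib
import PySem

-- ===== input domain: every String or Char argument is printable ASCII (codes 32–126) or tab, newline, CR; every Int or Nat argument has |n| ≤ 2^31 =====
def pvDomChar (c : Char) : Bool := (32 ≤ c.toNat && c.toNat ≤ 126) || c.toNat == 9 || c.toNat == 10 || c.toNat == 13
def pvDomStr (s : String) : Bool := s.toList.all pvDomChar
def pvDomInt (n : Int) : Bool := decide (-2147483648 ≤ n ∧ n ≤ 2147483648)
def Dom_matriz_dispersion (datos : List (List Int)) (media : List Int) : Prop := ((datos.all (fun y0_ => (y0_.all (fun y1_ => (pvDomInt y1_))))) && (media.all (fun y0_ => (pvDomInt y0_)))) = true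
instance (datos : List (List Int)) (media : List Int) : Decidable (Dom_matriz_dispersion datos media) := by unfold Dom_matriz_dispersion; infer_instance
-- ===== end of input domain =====

-- B replaces A's per-record outer-product accumulation by a two-phase X then Xᵀ·X
-- computation with per-entry sums, reusing below-diagonal entries by symmetry
-- (objective: alternative decomposition, same asymptotic cost).

-- ===== PORT A =====
-- loop body of A's `for registro in datos` loop; indices i, j range over 0..d-1,
-- so `getD i 0` is exact for Python's registro[i]/media[i] under Pre_ (indices in range).
def pvStepA (media : List Int) (S : List (List Int)) (registro : List Int) : List (List Int) :=
  let d := media.length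
  let diferencia := (List.range d).map (fun i => registro.getD i 0 - media.getD i 0)
  (List.range d).foldl (fun S i =>
    (List.range d).foldl (fun S j =>
      S.modify i (fun row => row.modify j
        (fun x => x + diferencia.getD i 0 * diferencia.getD j 0))) S) S

def matriz_dispersion (datos : List (List Int)) (media : List Int) : List (List Int) :=
  let d := media.length
  let S := List.replicate d (List.replicate d (0 : Int))
  datos.foldl (pvStepA media) S

-- ===== PORT B =====
-- loop body of B's `for i in range(d)` loop: append row i, copying S[j][i] for j < i.
def pvStepB (X : List (List Int)) (d : Nat) (S : List (List Int)) (i : Nat) : List (List Int) :=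
  S ++ [(List.range d).map (fun j =>
    if j < i then (S.getD j []).getD i 0
    else X.foldl (fun acc x => acc + x.getD i 0 * x.getD j 0) 0)]

def matriz_dispersion_alt (datos : List (List Int)) (media : List Int) : List (List Int) :=
  let d := media.length
  let X := datos.map (fun registro => (List.range d).map (fun i => registro.getD i 0 - media.getD i 0))
  (List.range d).foldl (pvStepB X d) []

-- ===== PRECONDITION & SPEC =====
-- Pre_ excludes exactly the inputs where A raises IndexError: some record shorter than media.
def Pre_matriz_dispersion (datos : List (List Int)) (media : List Int) : Prop :=
  ∀ r ∈ datos, media.length ≤ r.length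
instance (datos : List (List Int)) (media : List Int) : Decidable (Pre_matriz_dispersion datos media) := by unfold Pre_matriz_dispersion; infer_instance

def pvWitness_matriz_dispersion : List (List Int) × List Int := ([[1, 2], [3, 4]], [2, 3])

def Spec_matriz_dispersion (datos : List (List Int)) (media : List Int) (out : List (List Int)) : Prop := out = matriz_dispersion_alt datos media
instance (datos : List (List Int)) (media : List Int) (out : List (List Int)) : Decidable (Spec_matriz_dispersion datos media out) := by unfold Spec_matriz_dispersion; infer_instance

-- ===== CLAIM (what is proved, stated in full; the proofs are below) =====
def Claim_equal_matriz_dispersion : Prop := ∀ (datos : List (List Int)) (media : List Int), Dom_matriz_dispersion datos media → Pre_matriz_dispersion datos media → Spec_matriz_dispersion datos media (matriz_dispersion datos media)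

-- ===== LEMMAS AND PROOFS =====

def pvDiff (media r : List Int) (i : Nat) : Int := r.getD i 0 - media.getD i 0

-- the (i,j) scatter-matrix entry, with A's accumulation order over records
def pvE (datos : List (List Int)) (media : List Int) (i j : Nat) : Int :=
  datos.foldl (fun a r => a + pvDiff media r i * pvDiff media r j) 0

lemma pv_getD_map_range {α : Type} (d k : Nat) (f : Nat → α) (a : α) :
    ((List.range d).map f).getD k a = if k < d then f k else a := by
  by_cases h : k < d
  · simp [List.getD_eq_getElem?_getD, h]
  · simp [List.getD_eq_getElem?_getD, h]

lemma pv_modify_modify {α : Type} (l : List α) (i : Nat) (f g : α → α) :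
    (l.modify i f).modify i g = l.modify i (fun x => g (f x)) := by
  apply List.ext_getElem (by simp)
  intro k h1 h2
  simp only [List.getElem_modify]
  split <;> rfl

lemma pv_foldl_modify_row {α β : Type} (js : List β) (i : Nat) (g : β → α → α) (S : List α) :
    js.foldl (fun S j => S.modify i (g j)) S
      = S.modify i (fun row => js.foldl (fun r j => g j r) row) := by
  induction js generalizing S with
  | nil =>
      apply List.ext_getElem (by simp)
      intro k h1 h2
      simp [List.getElem_modify]
  | cons j js ih =>
      simp only [List.foldl_cons]
      rw [ih, pv_modify_modify]

lemma pv_foldl_modify_range {α : Type} (g : Nat → α → α) (l : List α) :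
    ∀ n, (List.range n).foldl (fun l i => l.modify i (g i)) l
      = l.mapIdx (fun i x => if i < n then g i x else x)
  | 0 => by
      apply List.ext_getElem (by simp)
      intro k h1 h2
      simp
  | n + 1 => by
      rw [List.range_succ, List.foldl_append, pv_foldl_modify_range g l n]
      simp only [List.foldl_cons, List.foldl_nil]
      apply List.ext_getElem (by simp)
      intro k h1 h2
      simp only [List.getElem_modify, List.getElem_mapIdx]
      split_ifs <;> simp_all <;> omega

lemma pv_mapIdx_map_range {α : Type} (d : Nat) (f : Nat → α) (g : Nat → α → α) :
    ((List.range d).map f).mapIdx (fun i x => if i < d then g i x else x)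
      = (List.range d).map (fun i => g i (f i)) := by
  apply List.ext_getElem (by simp)
  intro k h1 h2
  have hk : k < d := by simpa using h2
  simp [List.getElem_mapIdx, hk]

lemma pv_A_step (media r : List Int) (e : Nat → Nat → Int) :
    pvStepA media ((List.range media.length).map
        (fun i => (List.range media.length).map (fun j => e i j))) r
    = (List.range media.length).map (fun i => (List.range media.length).map
        (fun j => e i j + pvDiff media r i * pvDiff media r j)) := by
  simp only [pvStepA]
  have hstep : (fun (S : List (List Int)) (i : Nat) =>
      (List.range media.length).foldl (fun S j => S.modify i (fun row => row.modify j
        (fun x => x + ((List.range media.length).map (fun k => r.getD k 0 - media.getD k 0)).getD i 0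
          * ((List.range media.length).map (fun k => r.getD k 0 - media.getD k 0)).getD j 0))) S)
    = fun (S : List (List Int)) (i : Nat) => S.modify i (fun row => row.mapIdx (fun j x =>
        if j < media.length then
          x + ((List.range media.length).map (fun k => r.getD k 0 - media.getD k 0)).getD i 0
            * ((List.range media.length).map (fun k => r.getD k 0 - media.getD k 0)).getD j 0
        else x)) := by
    funext S i
    rw [pv_foldl_modify_row]
    congr 1
    funext row
    exact pv_foldl_modify_range _ row _
  rw [hstep, pv_foldl_modify_range, pv_mapIdx_map_range]
  apply List.map_congr_left
  intro i hi
  have hi' : i < media.length := List.mem_range.mp hi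
  rw [pv_mapIdx_map_range]
  apply List.map_congr_left
  intro j hj
  have hj' : j < media.length := List.mem_range.mp hj
  rw [pv_getD_map_range, pv_getD_map_range, if_pos hi', if_pos hj']
  rfl

lemma pv_A_fold (media : List Int) (datos : List (List Int)) (e : Nat → Nat → Int) :
    datos.foldl (pvStepA media)
      ((List.range media.length).map (fun i => (List.range media.length).map (fun j => e i j)))
    = (List.range media.length).map (fun i => (List.range media.length).map
        (fun j => datos.foldl (fun a r => a + pvDiff media r i * pvDiff media r j) (e i j))) := by
  induction datos generalizing e with
  | nil => rfl
  | cons r rs ih =>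
      simp only [List.foldl_cons]
      rw [pv_A_step media r e, ih (fun i j => e i j + pvDiff media r i * pvDiff media r j)]

lemma pv_E_symm (datos : List (List Int)) (media : List Int) (i j : Nat) :
    pvE datos media i j = pvE datos media j i := by
  unfold pvE
  congr 1
  funext a r
  ring

lemma pv_B_sum (datos : List (List Int)) (media : List Int) (i j : Nat)
    (hi : i < media.length) (hj : j < media.length) :
    (datos.map (fun registro => (List.range media.length).map
        (fun k => registro.getD k 0 - media.getD k 0))).foldl
      (fun acc x => acc + x.getD i 0 * x.getD j 0) 0 = pvE datos media i j := by
  rw [List.foldl_map]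
  unfold pvE
  congr 1
  funext a r
  rw [pv_getD_map_range, pv_getD_map_range, if_pos hi, if_pos hj]
  rfl

lemma pv_B_fold (datos : List (List Int)) (media : List Int) :
    ∀ n, n ≤ media.length →
    (List.range n).foldl
      (pvStepB (datos.map (fun registro => (List.range media.length).map
        (fun k => registro.getD k 0 - media.getD k 0))) media.length) []
    = (List.range n).map (fun i => (List.range media.length).map (fun j => pvE datos media i j))
  | 0, _ => by simp
  | n + 1, h => by
      have hn : n ≤ media.length := Nat.le_of_succ_le h
      have hnd : n < media.length := h
      rw [List.range_succ, List.foldl_append, pv_B_fold datos media n hn]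
      simp only [List.foldl_cons, List.foldl_nil, pvStepB]
      rw [List.map_append]
      congr 1
      simp only [List.map_cons, List.map_nil]
      congr 1
      apply List.map_congr_left
      intro j hj
      have hj' : j < media.length := List.mem_range.mp hj
      by_cases hjn : j < n
      · rw [if_pos hjn, pv_getD_map_range, if_pos hjn, pv_getD_map_range, if_pos hnd,
          pv_E_symm]
      · rw [if_neg hjn]
        exact pv_B_sum datos media n j hnd hj'

lemma pv_main_eq (datos : List (List Int)) (media : List Int) :
    matriz_dispersion datos media = matriz_dispersion_alt datos media := by
  simp only [matriz_dispersion, matriz_dispersion_alt]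
  have h0 : List.replicate media.length (List.replicate media.length (0 : Int))
      = (List.range media.length).map (fun _ => (List.range media.length).map
          (fun _ => (0 : Int))) := by
    apply List.ext_getElem (by simp)
    intro k h1 h2
    simp only [List.getElem_replicate, List.getElem_map]
    apply List.ext_getElem (by simp)
    intro m h3 h4
    simp
  rw [h0, pv_A_fold media datos (fun _ _ => 0),
    pv_B_fold datos media media.length (le_refl _)]
  rfl

-- ===== VERDICT (by name: the statement is the Claim_ definition above) =====
theorem matriz_dispersion_spec : Claim_equal_matriz_dispersion := by
  intro datos media _ _
  unfold Spec_matriz_dispersion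
  exact pv_main_eq datos media
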